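-- pv_equiv track=rewrite | github.com/ericzacharia/MarkovSpeakerRecognition | markov.py | k_strings
-- ===== SOURCE A (Python) =====
-- def k_strings(i, k, string):
--     """
--     This method creates strings of length k and k + 1, starting from an index i, from an input string.
--
--     Inputs: integer index i, integer k, and a string
--     Outputs: a string of length k and a string of length k + 1.
--     """
--     k_string = ''
--     k_plus_1_string = ''
--     for j in range(k):
--         k_string += string[(i + j) % len(string)]
--     for m in range(k + 1):
--         k_plus_1_string += string[(i + m) % len(string)]
--     return k_string, k_plus_1_string
-- ===== SOURCE B (Python) =====
-- def k_strings(i, k, string):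
--     """Replicate-and-slice re-implementation: instead of indexing each character
--     modulo len(string), tile the string enough times and cut both answers out."""
--     m = k + 1
--     if m <= 0:
--         return '', ''
--     start = i % len(string)
--     rep = string * (m // len(string) + 2)
--     return rep[start:start + k], rep[start:start + k + 1]
-- ===== Notes on version B (the rewrite author's own statement) =====
-- stated objective: faster
-- what changed: Replaced A's two per-character modular-indexing append loops by replicate-and-slice: compute start = i % len once, tile the string (k+1)//len + 2 times, and cut both answers out as contiguous slices.
import Mathlib
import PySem

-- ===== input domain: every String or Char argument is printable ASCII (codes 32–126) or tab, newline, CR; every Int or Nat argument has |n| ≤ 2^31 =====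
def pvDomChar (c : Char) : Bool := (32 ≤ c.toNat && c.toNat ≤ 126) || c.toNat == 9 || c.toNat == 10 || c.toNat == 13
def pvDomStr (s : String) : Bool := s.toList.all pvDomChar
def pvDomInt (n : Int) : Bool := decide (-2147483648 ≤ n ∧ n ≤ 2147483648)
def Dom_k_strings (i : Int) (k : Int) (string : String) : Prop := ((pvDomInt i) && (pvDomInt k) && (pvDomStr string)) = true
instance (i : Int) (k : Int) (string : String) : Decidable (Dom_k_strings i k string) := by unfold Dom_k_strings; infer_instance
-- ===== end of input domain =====

-- B replaces A's two per-character modular-indexing loops by one replicate-and-slice step (objective: alternative).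

-- ===== PORT A =====
-- Literal port of A: two for-loops over range(k) / range(k+1), each appending string[(i+j) % len(string)].
-- The accumulated Python string is carried as a List Char and packed with String.ofList at the end.
def k_strings (i : Int) (k : Int) (string : String) : String × String :=
  let cs := string.toList
  let k_string := (PySem.List.pyRange 0 k 1).foldl (fun acc j =>
      acc ++ (match PySem.List.pyGet? cs (PySem.Int.mod (i + j) (PySem.Str.len string)) with
              | some c => [c]
              | none => []) ) []
  let k_plus_1_string := (PySem.List.pyRange 0 (k + 1) 1).foldl (fun acc m =>
      acc ++ (match PySem.List.pyGet? cs (PySem.Int.mod (i + m) (PySem.Str.len string)) with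
              | some c => [c]
              | none => []) ) []
  (String.ofList k_string, String.ofList k_plus_1_string)

-- ===== PORT B =====
-- Literal port of Source B: m = k+1; early ('','') for m ≤ 0; start = i % len; rep = string * (m//len + 2);
-- the two answers are the slices rep[start:start+k] and rep[start:start+k+1].
-- On len(string) = 0 (with m > 0) the Python raises ZeroDivisionError at 'i % len(string)'; excluded by Pre_.
def k_strings_alt (i : Int) (k : Int) (string : String) : String × String :=
  let m := k + 1
  if m ≤ 0 then ("", "")
  else
    let n := PySem.Str.len string
    if n = 0 then ("", "")
    else
      let start := PySem.Int.mod i n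
      let rep := (List.replicate (PySem.Int.floordiv m n + 2).toNat string.toList).flatten
      (String.ofList (PySem.List.slice rep (some start) (some (start + k))),
       String.ofList (PySem.List.slice rep (some start) (some (start + k + 1))))

-- ===== PRECONDITION & SPEC =====
-- Pre_ excludes exactly the inputs where A raises: string = "" with k ≥ 0 hits '% 0' (ZeroDivisionError).
def Pre_k_strings (i : Int) (k : Int) (string : String) : Prop := k < 0 ∨ string ≠ ""
instance (i : Int) (k : Int) (string : String) : Decidable (Pre_k_strings i k string) := by
  unfold Pre_k_strings; infer_instance
def pvWitness_k_strings : Int × Int × String := (2, 3, "ab")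

def Spec_k_strings (i : Int) (k : Int) (string : String) (out : String × String) : Prop := out = k_strings_alt i k string
instance (i : Int) (k : Int) (string : String) (out : String × String) : Decidable (Spec_k_strings i k string out) := by unfold Spec_k_strings; infer_instance

-- ===== CLAIM (what is proved, stated in full; the proofs are below) =====
def Claim_equal_k_strings : Prop := ∀ (i : Int) (k : Int) (string : String), Dom_k_strings i k string → Pre_k_strings i k string → Spec_k_strings i k string (k_strings i k string)

-- ===== LEMMAS AND PROOFS =====

-- a flatMap whose pieces are all singletons is a map
theorem flatMap_eq_map_of_singleton {α β : Type} (l : List α) (g : α → List β) (f : α → β)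
    (h : ∀ x ∈ l, g x = [f x]) : l.flatMap g = l.map f := by
  induction l with
  | nil => simp
  | cons a l ih =>
    simp only [List.flatMap_cons, List.map_cons, h a (by simp),
      ih (fun x hx => h x (by simp [hx])), List.singleton_append]

-- element of a tiled list: position t of flatten (replicate c cs) is cs at t % cs.length
theorem flatten_replicate_getD (cs : List Char) (c t : Nat) (d : Char)
    (ht : t < c * cs.length) :
    ((List.replicate c cs).flatten).getD t d = cs.getD (t % cs.length) d := by
  induction c generalizing t with
  | zero => simp at ht
  | succ c ih =>
    have hcs : 0 < cs.length := by by_contra h; simp [Nat.le_zero.mp (Nat.not_lt.mp h)] at ht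
    have hsm : (c + 1) * cs.length = c * cs.length + cs.length := by ring
    rw [List.replicate_succ, List.flatten_cons]
    by_cases h : t < cs.length
    · rw [List.getD_append _ _ _ _ h, Nat.mod_eq_of_lt h]
    · have h' : cs.length ≤ t := Nat.not_lt.mp h
      have ht' : t - cs.length < c * cs.length := by omega
      rw [List.getD_append_right _ _ _ _ h', ih _ ht', Nat.mod_eq_sub_mod h']

-- a contiguous window of a list, as a map over range
theorem drop_take_eq_map_range (xs : List Char) (s m : Nat) (d : Char)
    (h : s + m ≤ xs.length) :
    (xs.drop s).take m = (List.range m).map (fun j => xs.getD (s + j) d) := by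
  apply List.ext_getElem
  · simp; omega
  · intro n h1 h2
    have hn : n < m := by simp at h2; omega
    have hsn : s + n < xs.length := by omega
    simp [List.getElem_take, List.getElem_drop, List.getElem?_eq_getElem hsn]

-- the A-side loop, as a map over range
theorem loopA_eq_map (i K : Int) (cs : List Char) (hK : 0 ≤ K) (hcs : cs ≠ []) :
    (PySem.List.pyRange 0 K 1).foldl (fun acc j =>
      acc ++ (match PySem.List.pyGet? cs (PySem.Int.mod (i + j) (cs.length : Int)) with
              | some c => [c]
              | none => []) ) []
    = (List.range K.toNat).map (fun (j : Nat) =>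
        cs.getD ((PySem.Int.mod (i + (j : Int)) (cs.length : Int)).toNat) ' ') := by
  have hn : 0 < (cs.length : Int) := by
    have := List.length_pos_iff.mpr hcs; exact_mod_cast this
  rw [PySem.List.foldl_append_eq_flatMap]
  rw [PySem.List.pyRange_one, List.flatMap_map]
  have hKK : (K - 0).toNat = K.toNat := by omega
  rw [hKK, List.nil_append]
  apply flatMap_eq_map_of_singleton
  intro j _
  have h0 : (0 : Int) + (j : Int) = (j : Int) := by ring
  have hge : 0 ≤ PySem.Int.mod (i + (j : Int)) (cs.length : Int) := PySem.Int.mod_nonneg _ hn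
  have hlt : PySem.Int.mod (i + (j : Int)) (cs.length : Int) < (cs.length : Int) :=
    PySem.Int.mod_lt _ hn
  have hlt' : (PySem.Int.mod (i + (j : Int)) (cs.length : Int)).toNat < cs.length := by omega
  rw [h0, PySem.List.pyGet?_of_nonneg _ hge, List.getElem?_eq_getElem hlt',
    List.getD_eq_getElem _ _ hlt']

theorem k_strings_spec : Claim_equal_k_strings := by
  intro i k string hDom hPre
  unfold Spec_k_strings
  by_cases hk : k + 1 ≤ 0
  · -- both loops empty / early return
    have h1 : PySem.List.pyRange 0 k 1 = [] := PySem.List.pyRange_one_eq_nil (by omega)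
    have h2 : PySem.List.pyRange 0 (k + 1) 1 = [] := PySem.List.pyRange_one_eq_nil (by omega)
    simp [k_strings, k_strings_alt, hk, h1, h2]
  · have hk0 : 0 ≤ k := by omega
    have hs : string ≠ "" := hPre.resolve_left (by omega)
    have hcs : string.toList ≠ [] := by
      intro h
      apply hs
      have := congrArg String.ofList h
      simpa using this
    have hlen : PySem.Str.len string = (string.toList.length : Int) := by
      simp [PySem.Str.len_eq]
    have hn : 0 < ((string.toList.length : Int)) := by
      have := List.length_pos_iff.mpr hcs; exact_mod_cast this
    set cs := string.toList with hcsdef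
    set n : Int := (cs.length : Int) with hndef
    set start : Int := PySem.Int.mod i n with hstart
    set cnt : Nat := (PySem.Int.floordiv (k + 1) n + 2).toNat with hcnt
    have hge : 0 ≤ start := PySem.Int.mod_nonneg _ hn
    have hlt : start < n := PySem.Int.mod_lt _ hn
    have hrepl : ((List.replicate cnt cs).flatten).length = cnt * cs.length := by
      simp [List.length_flatten, List.map_replicate, List.sum_replicate, smul_eq_mul]
    have hcover : start.toNat + (k + 1).toNat ≤ cnt * cs.length := by
      have hfd := PySem.Int.floordiv_mul_add_mod (k + 1) n
      have hm0 : 0 ≤ PySem.Int.mod (k + 1) n := PySem.Int.mod_nonneg _ hn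
      have hm1 : PySem.Int.mod (k + 1) n < n := PySem.Int.mod_lt _ hn
      have hfd0 : 0 ≤ PySem.Int.floordiv (k + 1) n := by nlinarith
      have hcval : (cnt : Int) = PySem.Int.floordiv (k + 1) n + 2 := by omega
      have hmul : (cnt : Int) * n = PySem.Int.floordiv (k + 1) n * n + 2 * n := by
        rw [hcval]; ring
      have hcastl : (↑(cnt * cs.length) : Int) = (cnt : Int) * n := by
        push_cast [hndef]; ring
      omega
    -- the common window equation, for any 0 ≤ K ≤ k + 1
    have key : ∀ K : Int, 0 ≤ K → K ≤ k + 1 →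
        (PySem.List.pyRange 0 K 1).foldl (fun acc j =>
          acc ++ (match PySem.List.pyGet? cs (PySem.Int.mod (i + j) n) with
                  | some c => [c]
                  | none => []) ) []
        = PySem.List.slice ((List.replicate cnt cs).flatten) (some start) (some (start + K)) := by
      intro K hK0 hK1
      rw [hndef, loopA_eq_map i K cs hK0 hcs, ← hndef]
      rw [PySem.List.slice_toNat _ hge (by omega)]
      have htn : (start + K).toNat - start.toNat = K.toNat := by omega
      rw [htn]
      have hwin : start.toNat + K.toNat ≤ ((List.replicate cnt cs).flatten).length := by
        rw [hrepl]; omega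
      rw [drop_take_eq_map_range _ _ _ ' ' hwin]
      apply List.map_congr_left
      intro j hj
      have hjK : j < K.toNat := List.mem_range.mp hj
      have hb : start.toNat + j < cnt * cs.length := by omega
      rw [flatten_replicate_getD cs cnt _ ' ' hb]
      congr 1
      -- (start.toNat + j) % cs.length = (mod (i + j) n).toNat
      rw [PySem.Int.mod_eq_emod_of_pos hn]
      have estart : (start.toNat : Int) = i % n := by
        rw [Int.toNat_of_nonneg hge, hstart, PySem.Int.mod_eq_emod_of_pos hn]
      have hIntEq : (((start.toNat + j) % cs.length : Nat) : Int) = (i + (j : Int)) % n := by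
        push_cast
        rw [← hndef, estart]
        conv_rhs => rw [Int.add_emod]
        conv_lhs => rw [Int.add_emod, Int.emod_emod_of_dvd _ dvd_rfl]
      have hge2 : 0 ≤ (i + (j : Int)) % n := Int.emod_nonneg _ (by omega)
      omega
    -- assemble
    show k_strings i k string = k_strings_alt i k string
    unfold k_strings k_strings_alt
    simp only [← hcsdef, hlen, ← hstart, ← hcnt]
    rw [if_neg (by omega : ¬ (k + 1 ≤ 0)), if_neg (by omega : ¬ (n = 0))]
    have hassoc : start + k + 1 = start + (k + 1) := by ring
    rw [key k hk0 (by omega), hassoc, key (k + 1) (by omega) (le_refl _)]
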